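-- pv_equiv track=rewrite | github.com/bearics/coding-test | pro-42841.py | solution
-- ===== SOURCE A (Python) =====
-- def solution(baseball):
--   answer = 0
--   candidate = [[i for i in range(1, 10)] for _ in range(3)]
--   for i in range(1,10):
--     for j in range(1, 10):
--       if j == i:
--         continue
--       for k in range(1, 10):
--         if k == i or k == j:
--           continue
--         is_suc = True
--         for line in baseball:
--           nums, strike, ball = line
--           test_strike, test_ball = 0, 0
--           test_nums = [i, j, k]
--           nums = [int(c) for c in str(nums)]
--           for idx in range(3):
--             if test_nums[idx] == nums[idx]:
--               test_strike += 1
--             else: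
--               if test_nums[idx] in nums:
--                 test_ball += 1
--           if not (test_strike == strike and test_ball == ball):
--             is_suc = False
--             break
--         if is_suc == True:
--           answer += 1
--   return answer
-- ===== SOURCE B (Python) =====
-- def solution(baseball):
--     hints = []
--     for line in baseball:
--         nums, strike, ball = line
--         hints.append(([int(c) for c in str(nums)], strike, ball))
--
--     def extend(pos, d, states):
--         # one digit placed at position pos: update every hint's (strike, ball)
--         # counters; prune (return None) as soon as one counter overshoots.
--         new = []
--         for (digits, st, bl), (s, b) in zip(hints, states):
--             if d == digits[pos]:
--                 s += 1
--             elif d in digits: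
--                 b += 1
--             if s > st or b > bl:
--                 return None
--             new.append((s, b))
--         return new
--
--     def dfs(pos, chosen, states):
--         if pos == 3:
--             ok = all(s == st and b == bl
--                      for (_, st, bl), (s, b) in zip(hints, states))
--             return 1 if ok else 0
--         total = 0
--         for d in range(1, 10):
--             if d in chosen:
--                 continue
--             ns = extend(pos, d, states)
--             if ns is not None:
--                 total += dfs(pos + 1, chosen + [d], ns)
--         return total
--
--     return dfs(0, [], [(0, 0)] * len(hints))
-- ===== Notes on version B (the rewrite author's own statement) =====
-- stated objective: alternative
-- what changed: A brute-forces all 504 distinct-digit triples and re-checks every hint per triple; B parses the hints once and runs a depth-first backtracking search that places one digit at a time, carrying incremental per-hint (strike,ball) counters and pruning a branch as soon as any counter overshoots its hint.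
-- outside the precondition, e.g. on solution([[123, 3, 1], [5, 0, 0]]): A returns 0, B raises IndexError; on solution([[65535, 70, -1000000], [2147483647]]): A returns 0, B raises ValueError
import Mathlib
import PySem

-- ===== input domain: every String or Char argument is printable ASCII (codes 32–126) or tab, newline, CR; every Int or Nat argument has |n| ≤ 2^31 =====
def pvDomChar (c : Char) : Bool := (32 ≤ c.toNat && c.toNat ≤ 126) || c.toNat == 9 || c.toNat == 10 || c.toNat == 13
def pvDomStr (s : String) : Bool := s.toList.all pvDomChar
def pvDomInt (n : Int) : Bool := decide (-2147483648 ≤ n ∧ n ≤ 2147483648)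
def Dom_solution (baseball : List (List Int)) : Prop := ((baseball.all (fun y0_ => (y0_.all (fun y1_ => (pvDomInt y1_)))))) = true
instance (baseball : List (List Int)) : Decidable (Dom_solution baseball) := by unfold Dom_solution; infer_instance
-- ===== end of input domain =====

-- B replaces A's brute force over all 504 triples by a pruned depth-first backtracking
-- search with incremental per-hint (strike, ball) counters (same values; alternative algorithm).

-- shared helper: digits = [int(c) for c in str(nums)]; '(c.toNat : Int) - 48' is int(c),
-- exact on digit characters (str(nums) is all digits since Pre_ gives 100 ≤ nums)
def pvDigits (nums : Int) : List Int :=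
  (PySem.Int.toChars nums).map (fun c => (c.toNat : Int) - 48)

-- ===== PORT A =====
-- the idx-loop computing (test_strike, test_ball) for one hint line
def pvCountSB (testNums nums : List Int) : Int × Int :=
  (PySem.List.pyRange 0 3 1).foldl
    (fun sb idx =>
      if PySem.List.pyGetD testNums idx 0 = PySem.List.pyGetD nums idx 0 then (sb.1 + 1, sb.2)
      else if PySem.List.pyGetD testNums idx 0 ∈ nums then (sb.1, sb.2 + 1) else sb)
    ((0 : Int), (0 : Int))

-- the 'for line in baseball: … break' loop computing is_suc for one candidate
def pvCheckLines (testNums : List Int) : List (List Int) → Bool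
  | [] => true
  | line :: rest =>
    let nums := PySem.List.pyGetD line 0 0
    let strike := PySem.List.pyGetD line 1 0
    let ball := PySem.List.pyGetD line 2 0
    let sb := pvCountSB testNums (pvDigits nums)
    if sb.1 = strike ∧ sb.2 = ball then pvCheckLines testNums rest else false

def solution (baseball : List (List Int)) : Int :=
  (PySem.List.pyRange 1 10 1).foldl (fun answer i =>
    (PySem.List.pyRange 1 10 1).foldl (fun answer j =>
      if j = i then answer else
      (PySem.List.pyRange 1 10 1).foldl (fun answer k =>
        if k = i ∨ k = j then answer else
        if pvCheckLines [i, j, k] baseball then answer + 1 else answer) answer) answer) 0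

-- ===== PORT B =====
-- hints: one (digits, strike, ball) triple per line, parsed once up front
def pvHints (baseball : List (List Int)) : List (List Int × Int × Int) :=
  baseball.map (fun line =>
    (pvDigits (PySem.List.pyGetD line 0 0), PySem.List.pyGetD line 1 0, PySem.List.pyGetD line 2 0))

-- extend(pos, d, states): update every hint's counters; None as soon as one overshoots
def pvExtend (pos d : Int) : List (List Int × Int × Int) → List (Int × Int) → Option (List (Int × Int))
  | [], _ => some []
  | _, [] => some []
  | h :: hs, sb :: sbs =>
    let s := if d = PySem.List.pyGetD h.1 pos 0 then sb.1 + 1 else sb.1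
    let b := if d ≠ PySem.List.pyGetD h.1 pos 0 ∧ d ∈ h.1 then sb.2 + 1 else sb.2
    if s > h.2.1 ∨ b > h.2.2 then none
    else (pvExtend pos d hs sbs).map (fun ns => (s, b) :: ns)

-- the final 'all(...)' check of dfs at pos == 3
def pvAllMatch : List (List Int × Int × Int) → List (Int × Int) → Bool
  | [], _ => true
  | _, [] => true
  | h :: hs, sb :: sbs => (decide (sb.1 = h.2.1 ∧ sb.2 = h.2.2)) && pvAllMatch hs sbs

-- dfs(pos, chosen, states); the Nat fuel is 3 - pos (Python recurses from pos to 3)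
def pvDfs (hints : List (List Int × Int × Int)) : Nat → Int → List Int → List (Int × Int) → Int
  | 0, _pos, _chosen, states => if pvAllMatch hints states then 1 else 0
  | r + 1, pos, chosen, states =>
    (PySem.List.pyRange 1 10 1).foldl (fun total d =>
      if d ∈ chosen then total
      else match pvExtend pos d hints states with
        | none => total
        | some ns => total + pvDfs hints r (pos + 1) (chosen ++ [d]) ns) 0

def solution_alt (baseball : List (List Int)) : Int :=
  let hints := pvHints baseball
  pvDfs hints 3 0 [] (hints.map (fun _ => ((0 : Int), (0 : Int))))

-- ===== PRECONDITION & SPEC =====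
-- Pre_ excludes hint lines not of length exactly 3 (tuple-unpack ValueError) or whose number is
-- below 100 (str(nums) shorter than 3 digits → IndexError, or a '-' sign → ValueError); B parses
-- every hint up front and so raises on such a line even when an earlier never-satisfiable hint
-- makes A return 0 without reading it.
def Pre_solution (baseball : List (List Int)) : Prop :=
  ∀ line ∈ baseball, line.length = 3 ∧ (100 : Int) ≤ line.getD 0 0
instance (baseball : List (List Int)) : Decidable (Pre_solution baseball) := by
  unfold Pre_solution; infer_instance

def pvWitness_solution : List (List Int) := [[123, 1, 0], [456, 0, 1]]

def Spec_solution (baseball : List (List Int)) (out : Int) : Prop := out = solution_alt baseball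
instance (baseball : List (List Int)) (out : Int) : Decidable (Spec_solution baseball out) := by
  unfold Spec_solution; infer_instance

-- ===== CLAIM (what is proved, stated in full; the proofs are below) =====
def Claim_equal_solution : Prop := ∀ (baseball : List (List Int)), Dom_solution baseball → Pre_solution baseball → Spec_solution baseball (solution baseball)

-- ===== LEMMAS AND PROOFS =====

-- proof-side: the exact (strike, ball) tally of a digit list t placed from position pos
def pvSB (digits : List Int) : Int → List Int → Int × Int
  | _, [] => ((0 : Int), (0 : Int))
  | pos, d :: rest =>
    let t := pvSB digits (pos + 1) rest
    if d = PySem.List.pyGetD digits pos 0 then (t.1 + 1, t.2)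
    else if d ∈ digits then (t.1, t.2 + 1) else t

-- proof-side: the completions of a partial choice c by r more pairwise-new digits 1..9
def pvComps : List Int → Nat → List (List Int)
  | _, 0 => [[]]
  | c, r + 1 => (PySem.List.pyRange 1 10 1).flatMap
      (fun d => if d ∈ c then [] else (pvComps (c ++ [d]) r).map (fun s => d :: s))

-- proof-side: a full candidate t satisfies every hint exactly
def pvAllFinal (hints : List (List Int × Int × Int)) (t : List Int) : Bool :=
  hints.all (fun h => decide (pvSB h.1 0 t = (h.2.1, h.2.2)))

lemma pvSB_append (digits : List Int) (u v : List Int) (pos : Int) :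
    pvSB digits pos (u ++ v)
      = ((pvSB digits pos u).1 + (pvSB digits (pos + u.length) v).1,
         (pvSB digits pos u).2 + (pvSB digits (pos + u.length) v).2) := by
  induction u generalizing pos with
  | nil => simp [pvSB]
  | cons d u ih =>
    have hc : pos + ((u.length + 1 : Nat) : Int) = (pos + 1) + (u.length : Int) := by
      push_cast; ring
    simp only [List.cons_append, pvSB, List.length_cons, hc, ih (pos + 1)]
    split_ifs <;> simp [Prod.ext_iff] <;> ring

lemma pvSB_nonneg (digits : List Int) (pos : Int) (s : List Int) :
    0 ≤ (pvSB digits pos s).1 ∧ 0 ≤ (pvSB digits pos s).2 := by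
  induction s generalizing pos with
  | nil => simp [pvSB]
  | cons d s ih =>
    have := ih (pos + 1)
    simp only [pvSB]
    split_ifs <;> first | (simp; omega) | omega

lemma pvAllMatch_eq (hints : List (List Int × Int × Int)) (c : List Int) :
    pvAllMatch hints (hints.map (fun h => pvSB h.1 0 c)) = pvAllFinal hints c := by
  induction hints with
  | nil => rfl
  | cons h hs ih =>
    simp only [List.map_cons, pvAllMatch, pvAllFinal, List.all_cons]
    rw [show pvAllMatch hs (List.map (fun h => pvSB h.1 0 c) hs) = pvAllFinal hs c from ih]
    congr 1
    simp [Prod.ext_iff]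

-- one step of counters, as pvExtend computes it
def pvUpd (pos d : Int) (h : List Int × Int × Int) (sb : Int × Int) : Int × Int :=
  (if d = PySem.List.pyGetD h.1 pos 0 then sb.1 + 1 else sb.1,
   if d ≠ PySem.List.pyGetD h.1 pos 0 ∧ d ∈ h.1 then sb.2 + 1 else sb.2)

lemma pvSB_snoc (digits : List Int) (c : List Int) (d : Int) :
    pvSB digits 0 (c ++ [d]) = pvUpd (c.length : Int) d (digits, 0, 0) (pvSB digits 0 c) := by
  rw [pvSB_append digits c [d] 0]
  simp only [pvSB, pvUpd, zero_add]
  split_ifs with h1 h2 h2 <;> simp_all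

lemma pvExtend_none (pos d : Int) (hints : List (List Int × Int × Int))
    (f : List Int × Int × Int → Int × Int)
    (h : pvExtend pos d hints (hints.map f) = none) :
    ∃ h0 ∈ hints, (pvUpd pos d h0 (f h0)).1 > h0.2.1 ∨ (pvUpd pos d h0 (f h0)).2 > h0.2.2 := by
  induction hints with
  | nil => simp [pvExtend] at h
  | cons h0 hs ih =>
    simp only [List.map_cons, pvExtend] at h
    by_cases hb : (if d = PySem.List.pyGetD h0.1 pos 0 then (f h0).1 + 1 else (f h0).1) > h0.2.1
        ∨ (if d ≠ PySem.List.pyGetD h0.1 pos 0 ∧ d ∈ h0.1 then (f h0).2 + 1 else (f h0).2) > h0.2.2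
    · exact ⟨h0, List.mem_cons_self, by simpa [pvUpd] using hb⟩
    · rw [if_neg hb] at h
      rcases hx : pvExtend pos d hs (hs.map f) with _ | ns'
      · obtain ⟨h1, hm, hp⟩ := ih hx
        exact ⟨h1, List.mem_cons_of_mem _ hm, hp⟩
      · rw [hx] at h; simp at h

lemma pvExtend_some (pos d : Int) (hints : List (List Int × Int × Int))
    (f : List Int × Int × Int → Int × Int) (ns : List (Int × Int))
    (h : pvExtend pos d hints (hints.map f) = some ns) :
    ns = hints.map (fun h0 => pvUpd pos d h0 (f h0)) := by
  induction hints generalizing ns with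
  | nil => simp [pvExtend] at h; simp [h]
  | cons h0 hs ih =>
    simp only [List.map_cons, pvExtend] at h
    by_cases hb : (if d = PySem.List.pyGetD h0.1 pos 0 then (f h0).1 + 1 else (f h0).1) > h0.2.1
        ∨ (if d ≠ PySem.List.pyGetD h0.1 pos 0 ∧ d ∈ h0.1 then (f h0).2 + 1 else (f h0).2) > h0.2.2
    · rw [if_pos hb] at h; exact absurd h (by simp)
    · rw [if_neg hb] at h
      rcases hx : pvExtend pos d hs (hs.map f) with _ | ns'
      · rw [hx] at h; simp at h
      · rw [hx] at h
        simp only [Option.map_some, Option.some_inj] at h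
        subst h
        simp only [List.map_cons, pvUpd]
        exact congrArg _ (ih ns' hx)

lemma pvDfs_spec (hints : List (List Int × Int × Int)) :
    ∀ (r : Nat) (c : List Int),
    pvDfs hints r (c.length : Int) c (hints.map (fun h => pvSB h.1 0 c))
      = (((pvComps c r).filter (fun s => pvAllFinal hints (c ++ s))).length : Int) := by
  intro r
  induction r with
  | zero =>
    intro c
    simp only [pvDfs, pvComps, pvAllMatch_eq]
    by_cases h : pvAllFinal hints c = true <;> simp [List.filter, h]
  | succ r ih =>
    intro c
    simp only [pvDfs, pvComps]
    suffices H : ∀ (l : List Int) (a : Int),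
        l.foldl (fun total d =>
          if d ∈ c then total
          else match pvExtend (c.length : Int) d hints (hints.map (fun h => pvSB h.1 0 c)) with
            | none => total
            | some ns => total + pvDfs hints r ((c.length : Int) + 1) (c ++ [d]) ns) a
        = a + (((l.flatMap (fun d =>
              if d ∈ c then [] else (pvComps (c ++ [d]) r).map (fun s => d :: s))).filter
            (fun s => pvAllFinal hints (c ++ s))).length : Int) by
      simpa using H (PySem.List.pyRange 1 10 1) 0
    intro l
    induction l with
    | nil => intro a; simp
    | cons d l ihl =>
      intro a
      simp only [List.foldl_cons, List.flatMap_cons, List.filter_append, List.length_append]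
      by_cases hdc : d ∈ c
      · simp only [if_pos hdc, List.filter_nil, List.length_nil, Nat.zero_add]
        exact ihl a
      · simp only [if_neg hdc]
        rcases hx : pvExtend (c.length : Int) d hints (hints.map (fun h => pvSB h.1 0 c))
          with _ | ns
        · obtain ⟨h0, hmem, hgt⟩ := pvExtend_none _ _ _ _ hx
          have hsnoc : pvSB h0.1 0 (c ++ [d])
              = pvUpd (c.length : Int) d h0 (pvSB h0.1 0 c) := pvSB_snoc h0.1 c d
          have hnil : ((pvComps (c ++ [d]) r).map (fun s => d :: s)).filter
              (fun s => pvAllFinal hints (c ++ s)) = [] := by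
            rw [List.filter_eq_nil_iff]
            intro t ht
            obtain ⟨s', _, rfl⟩ := List.mem_map.mp ht
            have hsplit : c ++ d :: s' = (c ++ [d]) ++ s' := by simp
            have happ := pvSB_append h0.1 (c ++ [d]) s' 0
            have hpos := pvSB_nonneg h0.1 ((0 : Int) + (c ++ [d]).length) s'
            have hne : pvSB h0.1 0 ((c ++ [d]) ++ s') ≠ (h0.2.1, h0.2.2) := by
              rw [happ, hsnoc]
              intro hcontra
              rw [Prod.ext_iff] at hcontra
              simp only at hcontra
              rcases hgt with hg | hg <;> omega
            intro hall
            have hall' : hints.all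
                (fun h => decide (pvSB h.1 0 (c ++ d :: s') = (h.2.1, h.2.2))) = true := hall
            exact hne (hsplit ▸ of_decide_eq_true (List.all_eq_true.mp hall' h0 hmem))
          simp only [hx, hnil, List.length_nil, Nat.zero_add]
          rw [ihl]
        · have hns : ns = hints.map (fun h0 => pvSB h0.1 0 (c ++ [d])) := by
            rw [pvExtend_some _ _ _ _ _ hx]
            exact List.map_congr_left (fun h0 _ => (pvSB_snoc h0.1 c d).symm)
          have hlen : ((c.length : Int) + 1) = (((c ++ [d]).length : Nat) : Int) := by
            simp
          simp only [hx]
          rw [ihl, hns, hlen, ih (c ++ [d])]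
          rw [List.filter_map, List.length_map]
          have hpred : ∀ s : List Int,
              pvAllFinal hints (c ++ d :: s) = pvAllFinal hints ((c ++ [d]) ++ s) := by
            intro s; simp
          simp only [Function.comp_def, hpred]
          push_cast
          ring

-- A's per-line tally equals pvSB on a 3-digit candidate
lemma pvCountSB_eq (i j k : Int) (digits : List Int) :
    pvCountSB [i, j, k] digits = pvSB digits 0 [i, j, k] := by
  have hr : PySem.List.pyRange 0 3 1 = [0, 1, 2] := by rfl
  have g0 : PySem.List.pyGetD [i, j, k] 0 0 = i := rfl
  have g1 : PySem.List.pyGetD [i, j, k] 1 0 = j := rfl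
  have g2 : PySem.List.pyGetD [i, j, k] 2 0 = k := rfl
  simp only [pvCountSB, hr, List.foldl, g0, g1, g2, pvSB, zero_add, one_add_one_eq_two]
  split_ifs <;> simp

lemma pvCheckLines_eq (i j k : Int) (bb : List (List Int)) :
    pvCheckLines [i, j, k] bb = pvAllFinal (pvHints bb) [i, j, k] := by
  induction bb with
  | nil => rfl
  | cons line rest ih =>
    simp only [pvCheckLines, pvHints, List.map_cons, pvAllFinal, List.all_cons] at *
    rw [pvCountSB_eq, ih]
    by_cases h : pvSB (pvDigits (PySem.List.pyGetD line 0 0)) 0 [i, j, k]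
        = (PySem.List.pyGetD line 1 0, PySem.List.pyGetD line 2 0)
    · simp [h, Prod.ext_iff]
    · have : ¬ ((pvSB (pvDigits (PySem.List.pyGetD line 0 0)) 0 [i, j, k]).1
            = PySem.List.pyGetD line 1 0
          ∧ (pvSB (pvDigits (PySem.List.pyGetD line 0 0)) 0 [i, j, k]).2
            = PySem.List.pyGetD line 2 0) := by
        intro hc; exact h (Prod.ext_iff.mpr hc)
      simp [h, this]

lemma pvComps_length {r : Nat} : ∀ {c s : List Int}, s ∈ pvComps c r → s.length = r := by
  induction r with
  | zero => intro c s hs; simp [pvComps] at hs; simp [hs]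
  | succ r ih =>
    intro c s hs
    simp only [pvComps, List.mem_flatMap] at hs
    obtain ⟨d, _, hd⟩ := hs
    by_cases hdc : d ∈ c
    · simp [hdc] at hd
    · simp only [if_neg hdc, List.mem_map] at hd
      obtain ⟨s', hs', rfl⟩ := hd
      simp [ih hs']

-- A's counting loops = length of the filtered candidate list (level by level)
lemma pvCountK (bb : List (List Int)) (i j : Int) (hij : ¬ j = i) (l : List Int) (a : Int) :
    l.foldl (fun answer k =>
        if k = i ∨ k = j then answer else
        if pvCheckLines [i, j, k] bb then answer + 1 else answer) a
    = a + (((l.flatMap (fun k => if i ≠ j ∧ i ≠ k ∧ j ≠ k then [[i, j, k]] else [])).filter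
            (fun t => pvCheckLines t bb)).length : Int) := by
  induction l generalizing a with
  | nil => simp
  | cons x l ih =>
    simp only [List.foldl_cons, List.flatMap_cons, List.filter_append, List.length_append]
    by_cases hx : x = i ∨ x = j
    · have hcond : ¬ (i ≠ j ∧ i ≠ x ∧ j ≠ x) := by
        rcases hx with h | h <;> subst h <;> tauto
      simp only [if_pos hx, if_neg hcond, List.filter_nil, List.length_nil, Nat.zero_add]
      exact ih a
    · have hne : ¬ x = i ∧ ¬ x = j := not_or.mp hx
      have hcond : i ≠ j ∧ i ≠ x ∧ j ≠ x :=
        ⟨fun h => hij h.symm, fun h => hne.1 h.symm, fun h => hne.2 h.symm⟩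
      simp only [if_neg hx, if_pos hcond]
      by_cases hq : pvCheckLines [i, j, x] bb = true
      · simp only [if_pos hq, ih, List.filter_cons]
        simp
        ring
      · simp only [if_neg hq, ih, List.filter_cons]
        simp

lemma pvCountJ (bb : List (List Int)) (i : Int) (l : List Int) (a : Int) :
    l.foldl (fun answer j =>
        if j = i then answer else
        (PySem.List.pyRange 1 10 1).foldl (fun answer k =>
          if k = i ∨ k = j then answer else
          if pvCheckLines [i, j, k] bb then answer + 1 else answer) answer) a
    = a + (((l.flatMap (fun j => (PySem.List.pyRange 1 10 1).flatMap
              (fun k => if i ≠ j ∧ i ≠ k ∧ j ≠ k then [[i, j, k]] else []))).filter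
            (fun t => pvCheckLines t bb)).length : Int) := by
  induction l generalizing a with
  | nil => simp
  | cons x l ih =>
    simp only [List.foldl_cons, List.flatMap_cons, List.filter_append, List.length_append]
    by_cases hx : x = i
    · have hthis : ∀ k : Int, ¬ (i ≠ x ∧ i ≠ k ∧ x ≠ k) := by subst hx; tauto
      simp only [if_pos hx]
      rw [ih]
      congr 2
      simp [hthis]
    · simp only [if_neg hx]
      rw [pvCountK bb i x hx _ a, ih]
      push_cast
      ring

lemma pvCountI (bb : List (List Int)) (l : List Int) (a : Int) :
    l.foldl (fun answer i =>
        (PySem.List.pyRange 1 10 1).foldl (fun answer j =>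
          if j = i then answer else
          (PySem.List.pyRange 1 10 1).foldl (fun answer k =>
            if k = i ∨ k = j then answer else
            if pvCheckLines [i, j, k] bb then answer + 1 else answer) answer) answer) a
    = a + (((l.flatMap (fun i => (PySem.List.pyRange 1 10 1).flatMap (fun j =>
              (PySem.List.pyRange 1 10 1).flatMap
                (fun k => if i ≠ j ∧ i ≠ k ∧ j ≠ k then [[i, j, k]] else [])))).filter
            (fun t => pvCheckLines t bb)).length : Int) := by
  induction l generalizing a with
  | nil => simp
  | cons x l ih =>
    simp only [List.foldl_cons, List.flatMap_cons, List.filter_append, List.length_append]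
    rw [pvCountJ bb x _ a, ih]
    push_cast
    ring

-- the brute-force candidate enumeration and the DFS completion tree list the same 504 triples
set_option maxRecDepth 40000 in
lemma pvCands_eq :
    (PySem.List.pyRange 1 10 1).flatMap (fun i => (PySem.List.pyRange 1 10 1).flatMap (fun j =>
        (PySem.List.pyRange 1 10 1).flatMap
          (fun k => if i ≠ j ∧ i ≠ k ∧ j ≠ k then [[i, j, k]] else [])))
      = pvComps [] 3 := by
  decide

-- ===== VERDICT (by name: the statement is the Claim_ definition above) =====
theorem solution_spec : Claim_equal_solution := by
  intro bb _ _
  unfold Spec_solution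
  have hB : solution_alt bb
      = (((pvComps [] 3).filter (fun s => pvAllFinal (pvHints bb) ([] ++ s))).length : Int) :=
    pvDfs_spec (pvHints bb) 3 []
  rw [hB]
  unfold solution
  rw [pvCountI bb _ 0, zero_add, pvCands_eq]
  norm_cast
  apply congrArg List.length
  apply List.filter_congr
  intro t ht
  obtain ⟨i, j, k, rfl⟩ := List.length_eq_three.mp (pvComps_length ht)
  simp [pvCheckLines_eq]
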